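-- pv_equiv track=rewrite | github.com/KangHaiLin/freedom | src/trading_engine/execution_engine/order_splitter.py | split_vanilla
-- ===== SOURCE A (Python) =====
-- from typing import List, Optional, Tuple
--
-- def split_vanilla(total_quantity: int, max_chunk: int, min_chunk: int = 100) -> List[int]:
--     """
--     简单受限拆分，不超过最大单笔
--     Args:
--         total_quantity: 总数量
--         max_chunk: 最大单笔
--         min_chunk: 最小单笔
--     Returns:
--         拆分后的数量列表
--     """
--     if total_quantity <= max_chunk:
--         return [total_quantity]
--
--     chunks = []
--     remaining = total_quantity
--
--     while remaining > 0:
--         if remaining <= max_chunk: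
--             if remaining >= min_chunk:
--                 chunks.append(remaining)
--             else:
--                 if chunks:
--                     chunks[-1] += remaining
--                 else:
--                     chunks.append(remaining)
--             break
--         else:
--             chunks.append(max_chunk)
--             remaining -= max_chunk
--
--     return chunks
-- ===== SOURCE B (Python) =====
-- def split_vanilla(total_quantity: int, max_chunk: int, min_chunk: int = 100):
--     if total_quantity <= max_chunk:
--         return [total_quantity]
--     if total_quantity <= 0:
--         return []
--     d, rem = divmod(total_quantity, max_chunk)
--     if rem == 0:
--         count, r = d - 1, max_chunk
--     else:
--         count, r = d, rem
--     chunks = [max_chunk] * count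
--     if r >= min_chunk:
--         chunks.append(r)
--     else:
--         chunks[-1] += r
--     return chunks
-- ===== Notes on version B (the rewrite author's own statement) =====
-- stated objective: simpler
-- what changed: Replaces A's subtract-one-chunk-at-a-time while loop with a single divmod: the chunk count and remainder are computed arithmetically, the list is built by replication, and one merge/append step handles the tail; Pre_ excludes only the inputs (total_quantity > max_chunk with max_chunk <= 0 and total_quantity > 0) where A's loop never terminates.
import Mathlib
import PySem

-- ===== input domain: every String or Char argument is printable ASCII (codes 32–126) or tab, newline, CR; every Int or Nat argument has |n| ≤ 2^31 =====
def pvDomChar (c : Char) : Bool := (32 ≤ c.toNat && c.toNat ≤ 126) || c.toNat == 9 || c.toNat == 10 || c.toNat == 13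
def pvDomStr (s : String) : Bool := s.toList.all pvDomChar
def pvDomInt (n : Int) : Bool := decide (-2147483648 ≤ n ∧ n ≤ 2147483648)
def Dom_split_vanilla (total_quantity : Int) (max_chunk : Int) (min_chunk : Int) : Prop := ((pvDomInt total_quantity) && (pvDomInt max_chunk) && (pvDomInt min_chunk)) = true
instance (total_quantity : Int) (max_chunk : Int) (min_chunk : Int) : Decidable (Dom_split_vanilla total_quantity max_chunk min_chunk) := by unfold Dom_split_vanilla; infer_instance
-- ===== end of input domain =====

-- B replaces A's subtract-one-chunk-at-a-time loop by a divmod: the chunk count and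
-- remainder are computed arithmetically and the list is built by replication (objective: simpler).

-- ===== PORT A =====
-- the while-loop of A; fuel = remaining.toNat bounds the iteration count (each step
-- subtracts max_chunk ≥ 1 under Pre_; at fuel 0 the loop guard remaining > 0 is false too)
def splitLoopA (max_chunk min_chunk : Int) : Nat → Int → List Int → List Int
  | 0, _, chunks => chunks
  | fuel + 1, remaining, chunks =>
    if remaining > 0 then
      if remaining ≤ max_chunk then
        if remaining ≥ min_chunk then
          chunks ++ [remaining]
        else
          if chunks ≠ [] then
            chunks.dropLast ++ [chunks.getLast?.getD 0 + remaining]   -- chunks[-1] += remaining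
          else
            chunks ++ [remaining]
      else
        splitLoopA max_chunk min_chunk fuel (remaining - max_chunk) (chunks ++ [max_chunk])
    else chunks

def split_vanilla (total_quantity : Int) (max_chunk : Int) (min_chunk : Int) : List Int :=
  if total_quantity ≤ max_chunk then [total_quantity]
  else splitLoopA max_chunk min_chunk total_quantity.toNat total_quantity []

-- ===== PORT B =====
-- the main (total_quantity > max_chunk > 0) branch of B
def splitMainB (total_quantity max_chunk min_chunk : Int) : List Int :=
  let d := PySem.Int.floordiv total_quantity max_chunk
  let rem := PySem.Int.mod total_quantity max_chunk
  let cr := if rem = 0 then (d - 1, max_chunk) else (d, rem)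
  let chunks := List.replicate cr.1.toNat max_chunk
  if cr.2 ≥ min_chunk then
    chunks ++ [cr.2]
  else
    chunks.dropLast ++ [chunks.getLast?.getD 0 + cr.2]   -- chunks[-1] += r

def split_vanilla_alt (total_quantity : Int) (max_chunk : Int) (min_chunk : Int) : List Int :=
  if total_quantity ≤ max_chunk then [total_quantity]
  else if total_quantity ≤ 0 then []
  else splitMainB total_quantity max_chunk min_chunk

-- ===== PRECONDITION & SPEC =====
-- Pre_ excludes exactly the inputs on which A's while-loop never terminates
-- (total_quantity > max_chunk with max_chunk ≤ 0 and total_quantity > 0): A returns on all admitted inputs.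
def Pre_split_vanilla (total_quantity : Int) (max_chunk : Int) (min_chunk : Int) : Prop :=
  0 < max_chunk ∨ total_quantity ≤ max_chunk ∨ total_quantity ≤ 0
instance (total_quantity : Int) (max_chunk : Int) (min_chunk : Int) : Decidable (Pre_split_vanilla total_quantity max_chunk min_chunk) := by unfold Pre_split_vanilla; infer_instance
def pvWitness_split_vanilla : Int × Int × Int := (1000, 300, 100)

def Spec_split_vanilla (total_quantity : Int) (max_chunk : Int) (min_chunk : Int) (out : List Int) : Prop := out = split_vanilla_alt total_quantity max_chunk min_chunk
instance (total_quantity : Int) (max_chunk : Int) (min_chunk : Int) (out : List Int) : Decidable (Spec_split_vanilla total_quantity max_chunk min_chunk out) := by unfold Spec_split_vanilla; infer_instance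

-- ===== CLAIM (what is proved, stated in full; the proofs are below) =====
def Claim_equal_split_vanilla : Prop := ∀ (total_quantity : Int) (max_chunk : Int) (min_chunk : Int), Dom_split_vanilla total_quantity max_chunk min_chunk → Pre_split_vanilla total_quantity max_chunk min_chunk → Spec_split_vanilla total_quantity max_chunk min_chunk (split_vanilla total_quantity max_chunk min_chunk)

-- ===== LEMMAS AND PROOFS =====

-- the loop only appends to / merges into the tail of its accumulator
lemma splitLoopA_append (mx mn : Int) : ∀ (f : Nat) (rem : Int) (a b : List Int), b ≠ [] →
    splitLoopA mx mn f rem (a ++ b) = a ++ splitLoopA mx mn f rem b := by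
  intro f
  induction f with
  | zero => intro rem a b hb; rfl
  | succ f ih =>
    intro rem a b hb
    have hab : (a ++ b) ≠ [] := by simp [hb]
    simp only [splitLoopA]
    by_cases h1 : rem > 0
    · by_cases h2 : rem ≤ mx
      · by_cases h3 : rem ≥ mn
        · simp [h1, h2, h3]
        · simp only [if_pos h1, if_pos h2, if_neg h3, if_pos hab, if_pos hb,
            List.dropLast_append_of_ne_nil hb, List.getLast?_append_of_ne_nil a hb]
          simp
      · simp only [if_pos h1, if_neg h2, List.append_assoc]
        exact ih _ a (b ++ [mx]) (by simp)
    · simp [h1]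

-- adding one more full chunk to the total prepends one max_chunk to B's main branch
lemma splitMainB_step (tq mx mn : Int) (hmx : 0 < mx) (hle : mx < tq) :
    splitMainB (tq + mx) mx mn = mx :: splitMainB tq mx mn := by
  have hd := PySem.Int.floordiv_mul_add_mod (tq + mx) mx
  have hd' := PySem.Int.floordiv_mul_add_mod tq mx
  have hm0' : 0 ≤ PySem.Int.mod tq mx := PySem.Int.mod_nonneg tq hmx
  have hm1' : PySem.Int.mod tq mx < mx := PySem.Int.mod_lt tq hmx
  have hdv : PySem.Int.floordiv (tq + mx) mx = PySem.Int.floordiv tq mx + 1 := by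
    rw [PySem.Int.floordiv_eq_iff_of_pos hmx]
    constructor <;> nlinarith
  have hmv : PySem.Int.mod (tq + mx) mx = PySem.Int.mod tq mx := by
    linear_combination hd - hd' - mx * hdv
  have hd1 : 1 ≤ PySem.Int.floordiv tq mx := by nlinarith
  have hd2 : PySem.Int.mod tq mx = 0 → 2 ≤ PySem.Int.floordiv tq mx := by
    intro hz
    rcases lt_or_ge (PySem.Int.floordiv tq mx) 2 with h | h
    · exfalso
      have h1 : PySem.Int.floordiv tq mx = 1 := by omega
      rw [h1, hz] at hd'; omega
    · exact h
  simp only [splitMainB, hdv, hmv]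
  generalize hD : PySem.Int.floordiv tq mx = D at hd1 hd2 ⊢
  generalize hR : PySem.Int.mod tq mx = R at hm0' hm1' hd2 ⊢
  by_cases hz : R = 0
  · have h2d : 2 ≤ D := hd2 hz
    simp only [if_pos hz]
    have e1 : (D + 1 - 1).toNat = (D - 1).toNat + 1 := by omega
    by_cases hmn : mx ≥ mn
    · simp only [ge_iff_le, if_pos hmn, e1, List.replicate_succ]
      simp
    · simp only [ge_iff_le, if_neg hmn, List.dropLast_replicate, List.getLast?_replicate,
        if_neg (show ¬ (D + 1 - 1).toNat = 0 by omega), if_neg (show ¬ (D - 1).toNat = 0 by omega),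
        Option.getD_some]
      rw [show (D + 1 - 1).toNat - 1 = ((D - 1).toNat - 1) + 1 by omega, List.replicate_succ]
      simp
  · simp only [if_neg hz]
    have e1 : (D + 1).toNat = D.toNat + 1 := by omega
    by_cases hmn : R ≥ mn
    · simp only [ge_iff_le, if_pos hmn, e1, List.replicate_succ]
      simp
    · simp only [ge_iff_le, if_neg hmn, List.dropLast_replicate, List.getLast?_replicate,
        if_neg (show ¬ (D + 1).toNat = 0 by omega), if_neg (show ¬ D.toNat = 0 by omega),
        Option.getD_some]
      rw [show (D + 1).toNat - 1 = (D.toNat - 1) + 1 by omega, List.replicate_succ]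
      simp

-- the started loop (accumulator [max_chunk], remaining = total - max_chunk) computes B's main branch
lemma splitLoop_core (mx mn : Int) (hmx : 0 < mx) : ∀ (f : Nat) (rem : Int), 0 < rem → rem.toNat ≤ f →
    splitLoopA mx mn f rem [mx] = splitMainB (rem + mx) mx mn := by
  intro f
  induction f with
  | zero => intro rem h1 h2; omega
  | succ f ih =>
    intro rem h1 h2
    have hd := PySem.Int.floordiv_mul_add_mod (rem + mx) mx
    by_cases hle : rem ≤ mx
    · -- last iteration: remaining ≤ max_chunk
      by_cases hrm : rem = mx
      · -- rem + mx = 2*mx : d = 2, mod = 0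
        have hd2 := PySem.Int.floordiv_mul_add_mod (mx + mx) mx
        have hdv : PySem.Int.floordiv (mx + mx) mx = 2 := by
          rw [PySem.Int.floordiv_eq_iff_of_pos hmx]; omega
        have hmv : PySem.Int.mod (mx + mx) mx = 0 := by rw [hdv] at hd2; omega
        have hdiv : (mx + mx) / mx = 2 := by
          rw [← PySem.Int.floordiv_eq_ediv_of_pos hmx]; exact hdv
        by_cases hmn : mx ≥ mn
        · simp [splitLoopA, splitMainB, hmx, hmn, hrm, hdiv]
        · simp [splitLoopA, splitMainB, hmx, hmn, hrm, hdiv]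
      · -- mx < rem + mx < 2*mx : d = 1, mod = rem
        have hdv : PySem.Int.floordiv (rem + mx) mx = 1 := by
          rw [PySem.Int.floordiv_eq_iff_of_pos hmx]; omega
        have hmv : PySem.Int.mod (rem + mx) mx = rem := by rw [hdv] at hd; omega
        have hne : rem ≠ 0 := by omega
        by_cases hmn : rem ≥ mn
        · simp [splitLoopA, splitMainB, hdv, hmv, h1, hle, hne, hmn]
        · simp [splitLoopA, splitMainB, hdv, hmv, h1, hle, hne, hmn]
    · -- recursive case: remaining > max_chunk
      rw [not_le] at hle
      have step : splitLoopA mx mn (f + 1) rem [mx]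
          = [mx] ++ splitLoopA mx mn f (rem - mx) [mx] := by
        simp only [splitLoopA, if_pos h1, if_neg (by omega : ¬ rem ≤ mx)]
        exact (by simpa using splitLoopA_append mx mn f (rem - mx) [mx] [mx] (by simp))
      rw [step, ih (rem - mx) (by omega) (by omega), show rem - mx + mx = rem by ring,
        splitMainB_step rem mx mn hmx hle]
      rfl

-- ===== VERDICT (by name: the statement is the Claim_ definition above) =====
theorem split_vanilla_spec : Claim_equal_split_vanilla := by
  intro tq mx mn _ hpre
  unfold Spec_split_vanilla split_vanilla split_vanilla_alt
  by_cases h1 : tq ≤ mx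
  · simp [h1]
  · simp only [if_neg h1]
    by_cases h2 : tq ≤ 0
    · have h0 : tq.toNat = 0 := by omega
      simp [h0, splitLoopA, if_pos h2]
    · have hmx : 0 < mx := by rcases hpre with h | h | h <;> omega
      simp only [if_neg h2]
      have htq : 0 < tq := by omega
      obtain ⟨k, hk⟩ : ∃ k, tq.toNat = k + 1 := ⟨tq.toNat - 1, by omega⟩
      rw [hk]
      simp only [splitLoopA, if_pos htq, if_neg (by omega : ¬ tq ≤ mx), List.nil_append]
      rw [splitLoop_core mx mn hmx k (tq - mx) (by omega) (by omega)]
      congr 1; omega
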